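-- pv_equiv track=rewrite | github.com/sshbrmv/pythonLabs | seabattle.py | is_ship_sunk
-- ===== SOURCE A (Python) =====
-- def is_ship_sunk(b, x, y, d):
--     if b[x][y] != "X": return False
--     v, s = set(), [(x, y)]
--     while s:
--         cx, cy = s.pop()
--         if (cx, cy) in v or not (0 <= cx < 10 and 0 <= cy < 10): continue
--         if b[cx][cy] == "X": v.add((cx, cy)); s.extend(
--             [(cx + dx, cy + dy) for dx, dy in [(0, 1), (1, 0), (0, -1), (-1, 0)] if
--              0 <= cx + dx < 10 and 0 <= cy + dy < 10])
--     for cx, cy in v: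
--         for dx, dy in [(0, 1), (1, 0), (0, -1), (-1, 0), (1, 1), (1, -1), (-1, 1), (-1, -1)]:
--             nx, ny = cx + dx, cy + dy
--             if 0 <= nx < 10 and 0 <= ny < 10 and b[nx][ny] == "S": return False
--     for cx, cy in v:
--         for dx, dy in [(0, 1), (1, 0), (0, -1), (-1, 0), (1, 1), (1, -1), (-1, 1), (-1, -1)]:
--             nx, ny = cx + dx, cy + dy
--             if 0 <= nx < 10 and 0 <= ny < 10 and b[nx][ny] == "~": b[nx][ny] = d[nx][ny] = "O"
--     return True
-- ===== SOURCE B (Python) =====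
-- # Same return values as A; replaces the explicit-stack flood fill with a recursive one
-- # and folds the sunk-check into a single any(); the final '~'-marking mutates b and d
-- # in place exactly as A does (the proved equivalence is about the return value).
-- def is_ship_sunk(b, x, y, d):
--     if b[x][y] != "X":
--         return False
--     v = set()
--     def fill(cx, cy):
--         if not (0 <= cx < 10 and 0 <= cy < 10):
--             return
--         if (cx, cy) in v or b[cx][cy] != "X":
--             return
--         v.add((cx, cy))
--         fill(cx - 1, cy)
--         fill(cx, cy - 1)
--         fill(cx + 1, cy)
--         fill(cx, cy + 1)
--     fill(x, y)
--     dirs = [(0, 1), (1, 0), (0, -1), (-1, 0), (1, 1), (1, -1), (-1, 1), (-1, -1)]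
--     if any(0 <= cx + dx < 10 and 0 <= cy + dy < 10 and b[cx + dx][cy + dy] == "S"
--            for cx, cy in v for dx, dy in dirs):
--         return False
--     for cx, cy in v:
--         for dx, dy in dirs:
--             nx, ny = cx + dx, cy + dy
--             if 0 <= nx < 10 and 0 <= ny < 10 and b[nx][ny] == "~":
--                 b[nx][ny] = d[nx][ny] = "O"
--     return True
-- ===== Notes on version B (the rewrite author's own statement) =====
-- stated objective: alternative
-- what changed: The explicit-stack flood fill is replaced by a recursive fill helper (guard, add to visited, recurse on the four orthogonal neighbours) and the early-return 'S'-scan over the visited set is folded into a single any(); the final '~'-marking pass (which mutates b and d in place, identically in A and B) is unchanged.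
import Mathlib
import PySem

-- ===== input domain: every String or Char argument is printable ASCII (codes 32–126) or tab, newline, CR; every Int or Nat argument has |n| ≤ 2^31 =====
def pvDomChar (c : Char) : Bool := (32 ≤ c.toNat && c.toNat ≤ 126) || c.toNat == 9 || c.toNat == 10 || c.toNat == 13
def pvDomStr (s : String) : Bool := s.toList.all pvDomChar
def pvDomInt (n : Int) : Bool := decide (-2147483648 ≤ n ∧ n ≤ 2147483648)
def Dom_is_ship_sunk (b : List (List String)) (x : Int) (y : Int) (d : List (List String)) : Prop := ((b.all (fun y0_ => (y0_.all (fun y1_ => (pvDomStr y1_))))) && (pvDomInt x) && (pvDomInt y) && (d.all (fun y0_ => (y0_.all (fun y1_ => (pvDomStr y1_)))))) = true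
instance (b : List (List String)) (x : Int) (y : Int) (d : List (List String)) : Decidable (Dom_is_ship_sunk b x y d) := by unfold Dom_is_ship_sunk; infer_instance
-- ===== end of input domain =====

-- B replaces A's explicit-stack flood fill with a recursive flood fill (different decomposition);
-- A and B both mutate b and d in the final marking pass identically — the equivalence proved here is
-- about the RETURN value only, so that pass is not ported.

-- shared small helpers: b[i][j] as an Option (none = IndexError in Python), the 0..9 range test,
-- the two direction tables, and the termination measure (number of in-range cells not yet visited)
def pvCell (b : List (List String)) (i j : Int) : Option String :=
  (PySem.List.pyGet? b i).bind fun r => PySem.List.pyGet? r j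

def pvInR (i j : Int) : Bool := decide (0 ≤ i ∧ i < 10 ∧ 0 ≤ j ∧ j < 10)

def pvDirs4 : List (Int × Int) := [(0, 1), (1, 0), (0, -1), (-1, 0)]

def pvDirs8 : List (Int × Int) :=
  [(0, 1), (1, 0), (0, -1), (-1, 0), (1, 1), (1, -1), (-1, 1), (-1, -1)]

def pvGrid : List (Int × Int) :=
  (List.range 10).flatMap (fun i => (List.range 10).map (fun j => ((i : Int), (j : Int))))

def pvUnv (v : List (Int × Int)) : Nat := (pvGrid.filter (fun c => decide (c ∉ v))).length

theorem pvMem_grid (p : Int × Int) (h : pvInR p.1 p.2 = true) : p ∈ pvGrid := by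
  obtain ⟨a, c⟩ := p
  unfold pvInR at h
  simp only [decide_eq_true_eq] at h
  obtain ⟨h1, h2, h3, h4⟩ := h
  unfold pvGrid
  simp only [List.mem_flatMap, List.mem_map, Prod.mk.injEq]
  refine ⟨a, ?_, c, ?_, rfl, rfl⟩
  · simp only [List.pure_def, List.bind_eq_flatMap, List.mem_flatMap, List.mem_range,
      List.mem_cons, List.not_mem_nil, or_false]
    exact ⟨a.toNat, by omega, by omega⟩
  · simp only [List.pure_def, List.bind_eq_flatMap, List.mem_flatMap, List.mem_range,
      List.mem_cons, List.not_mem_nil, or_false]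
    exact ⟨c.toNat, by omega, by omega⟩

theorem pvUnv_cons_lt (v : List (Int × Int)) (p : Int × Int)
    (hin : pvInR p.1 p.2 = true) (hnv : p ∉ v) : pvUnv (p :: v) < pvUnv v := by
  unfold pvUnv
  have hmem : p ∈ pvGrid.filter (fun c => decide (c ∉ v)) := by
    simp [List.mem_filter, pvMem_grid p hin, hnv]
  have heq : pvGrid.filter (fun c => decide (c ∉ (p :: v)))
      = (pvGrid.filter (fun c => decide (c ∉ v))).filter (fun c => decide (c ≠ p)) := by
    rw [List.filter_filter]
    apply List.filter_congr
    intro a _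
    by_cases h1 : a = p <;> by_cases h2 : a ∈ v <;> simp [h1, h2]
  rw [heq]
  apply List.length_filter_lt_length_iff_exists.mpr
  exact ⟨p, hmem, by simp⟩

-- ===== PORT A =====
-- A's while-loop over the explicit stack; the Python stack is held REVERSED here:
-- s.pop() = head, s.extend(l) = l.reverse ++ rest (so elements come off in the same order).
-- Under Pre_ every b[cx][cy] read is in range, so pvCell is some there; a none compares ≠ "X".
def pvLoopA (b : List (List String)) (v : List (Int × Int)) (s : List (Int × Int)) :
    List (Int × Int) :=
  match s with
  | [] => v
  | c :: rest =>
    if c ∈ v ∨ pvInR c.1 c.2 = false then pvLoopA b v rest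
    else if pvCell b c.1 c.2 = some "X" then
      pvLoopA b (c :: v)
        ((((pvDirs4.map (fun dd => (c.1 + dd.1, c.2 + dd.2))).filter
            (fun nn => pvInR nn.1 nn.2)).reverse) ++ rest)
    else pvLoopA b v rest
termination_by 5 * pvUnv v + s.length
decreasing_by
  · simp only [List.length_cons]; omega
  · rename_i h1 h2
    have hlt : pvUnv (c :: v) < pvUnv v := by
      rw [not_or] at h1
      exact pvUnv_cons_lt v c (by simpa using h1.2) h1.1
    have hlen : (((pvDirs4.map (fun dd => (c.1 + dd.1, c.2 + dd.2))).filter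
        (fun nn => pvInR nn.1 nn.2)).reverse).length ≤ 4 := by
      simp only [List.length_reverse]
      calc _ ≤ (pvDirs4.map (fun dd => (c.1 + dd.1, c.2 + dd.2))).length :=
              List.length_filter_le _ _
        _ = 4 := by simp [pvDirs4]
    simp only [List.length_append, List.length_cons]
    omega
  · simp only [List.length_cons]; omega

def is_ship_sunk (b : List (List String)) (x : Int) (y : Int) (d : List (List String)) : Bool :=
  if pvCell b x y ≠ some "X" then false   -- b[x][y] != "X" (pvCell = none means Python raises; excluded by Pre_)
  else
    let v := pvLoopA b [] [(x, y)]
    -- first 8-neighbour pass: return False on any adjacent 'S' (order over the set is irrelevant to the Bool)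
    if v.any (fun c => pvDirs8.any (fun dd =>
        pvInR (c.1 + dd.1) (c.2 + dd.2) &&
          decide (pvCell b (c.1 + dd.1) (c.2 + dd.2) = some "S"))) then false
    -- second pass only mutates b and d ('~' → 'O'); no effect on the return value
    else true

-- ===== PORT B =====
-- B's recursive flood fill; the visited set is threaded through the calls.  The subtype result
-- carries the fact pvUnv never grows, which the termination argument of the nested calls needs.
def pvFillB (b : List (List String)) (v : List (Int × Int)) (p : Int × Int) :
    {w : List (Int × Int) // pvUnv w ≤ pvUnv v} :=
  if h1 : pvInR p.1 p.2 = false then ⟨v, le_rfl⟩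
  else if h2 : p ∈ v ∨ pvCell b p.1 p.2 ≠ some "X" then ⟨v, le_rfl⟩
  else
    let ⟨w1, hw1⟩ := pvFillB b (p :: v) (p.1 - 1, p.2)
    let ⟨w2, hw2⟩ := pvFillB b w1 (p.1, p.2 - 1)
    let ⟨w3, hw3⟩ := pvFillB b w2 (p.1 + 1, p.2)
    let ⟨w4, hw4⟩ := pvFillB b w3 (p.1, p.2 + 1)
    ⟨w4, by
      have hlt := pvUnv_cons_lt v p (by simpa using h1) (by rw [not_or] at h2; exact h2.1)
      omega⟩
termination_by pvUnv v
decreasing_by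
  all_goals have hlt := pvUnv_cons_lt v p (by simpa using h1) (by rw [not_or] at h2; exact h2.1)
  all_goals omega

def is_ship_sunk_alt (b : List (List String)) (x : Int) (y : Int) (d : List (List String)) :
    Bool :=
  if pvCell b x y ≠ some "X" then false
  else
    let v := (pvFillB b [] (x, y)).1
    if v.any (fun c => pvDirs8.any (fun dd =>
        pvInR (c.1 + dd.1) (c.2 + dd.2) &&
          decide (pvCell b (c.1 + dd.1) (c.2 + dd.2) = some "S"))) then false
    else true

-- ===== PRECONDITION & SPEC =====
-- Pre_ excludes inputs where Python raises IndexError (b[x][y] itself, or a flood-fill /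
-- neighbour read or the d-marking write on a board smaller than 10×10); it conservatively
-- requires full 10×10 b and d whenever the hit cell is an in-range 'X', which also drops some
-- inputs on which A happens to return because the ship's neighbourhood never reaches the
-- missing cells (see the cite in the claim).
def Pre_is_ship_sunk (b : List (List String)) (x : Int) (y : Int) (d : List (List String)) : Prop :=
  (pvCell b x y).isSome = true ∧
  ((0 ≤ x ∧ x < 10 ∧ 0 ≤ y ∧ y < 10 ∧ pvCell b x y = some "X") →
    (b.length = 10 ∧ (∀ r ∈ b, r.length = 10) ∧ d.length = 10 ∧ (∀ r ∈ d, r.length = 10)))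
instance (b : List (List String)) (x : Int) (y : Int) (d : List (List String)) :
    Decidable (Pre_is_ship_sunk b x y d) := by unfold Pre_is_ship_sunk; infer_instance

def pvWitness_is_ship_sunk : List (List String) × Int × Int × List (List String) :=
  ([["~"]], 0, 0, [])

def Spec_is_ship_sunk (b : List (List String)) (x : Int) (y : Int) (d : List (List String)) (out : Bool) : Prop := out = is_ship_sunk_alt b x y d
instance (b : List (List String)) (x : Int) (y : Int) (d : List (List String)) (out : Bool) : Decidable (Spec_is_ship_sunk b x y d out) := by unfold Spec_is_ship_sunk; infer_instance

-- ===== CLAIM (what is proved, stated in full; the proofs are below) =====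
def Claim_equal_is_ship_sunk : Prop := ∀ (b : List (List String)) (x : Int) (y : Int) (d : List (List String)), Dom_is_ship_sunk b x y d → Pre_is_ship_sunk b x y d → Spec_is_ship_sunk b x y d (is_ship_sunk b x y d)

-- ===== LEMMAS AND PROOFS =====

-- value-level unfolding of pvFillB (drops the subtype proofs)
theorem pvFillB_val (b : List (List String)) (v : List (Int × Int)) (p : Int × Int) :
    (pvFillB b v p).1 =
      if pvInR p.1 p.2 = false then v
      else if p ∈ v ∨ pvCell b p.1 p.2 ≠ some "X" then v
      else (pvFillB b (pvFillB b (pvFillB b (pvFillB b (p :: v) (p.1 - 1, p.2)).1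
              (p.1, p.2 - 1)).1 (p.1 + 1, p.2)).1 (p.1, p.2 + 1)).1 := by
  rw [pvFillB]
  split
  · simp_all
  · split <;> simp_all

theorem pvFillB_skip (b : List (List String)) (v : List (Int × Int)) (p : Int × Int)
    (h : pvInR p.1 p.2 = false ∨ p ∈ v ∨ pvCell b p.1 p.2 ≠ some "X") :
    (pvFillB b v p).1 = v := by
  rw [pvFillB_val]
  rcases h with h | h
  · simp [h]
  · by_cases hr : pvInR p.1 p.2 = false
    · simp [hr]
    · rw [if_neg hr, if_pos h]

-- folding pvFillB over a list, ignoring out-of-range entries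
theorem pvFold_filter (b : List (List String)) (l : List (Int × Int)) :
    ∀ w, (l.filter (fun nn => pvInR nn.1 nn.2)).foldl (fun w p => (pvFillB b w p).1) w
      = l.foldl (fun w p => (pvFillB b w p).1) w := by
  induction l with
  | nil => intro w; rfl
  | cons q l ih =>
    intro w
    by_cases h : pvInR q.1 q.2 = true
    · simp only [List.filter_cons, h, if_true, List.foldl_cons]
      exact ih _
    · have h' : pvInR q.1 q.2 = false := by simpa using h
      simp only [List.filter_cons, h', Bool.false_eq_true, if_false, List.foldl_cons]
      rw [ih, pvFillB_skip b w q (Or.inl h')]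

theorem pvFold_unv_le (b : List (List String)) (l : List (Int × Int)) :
    ∀ w, pvUnv (l.foldl (fun w p => (pvFillB b w p).1) w) ≤ pvUnv w := by
  induction l with
  | nil => intro w; exact le_rfl
  | cons q l ih =>
    intro w
    simp only [List.foldl_cons]
    exact le_trans (ih _) (pvFillB b w q).2

-- the heart: A's stack loop equals folding B's recursive fill over the pending stack
theorem pvLoopA_foldl (b : List (List String)) :
    ∀ (n : Nat) (v t s : List (Int × Int)), 5 * pvUnv v + (t ++ s).length ≤ n →
      pvLoopA b v (t ++ s) = pvLoopA b (t.foldl (fun w p => (pvFillB b w p).1) v) s := by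
  intro n
  induction n with
  | zero =>
    intro v t s h
    cases t with
    | nil => rfl
    | cons p t' => simp at h
  | succ n ih =>
    intro v t s h
    cases t with
    | nil => rfl
    | cons p t' =>
      simp only [List.cons_append]
      rw [pvLoopA]
      by_cases hskip : p ∈ v ∨ pvInR p.1 p.2 = false
      · rw [if_pos hskip]
        have hfill : (pvFillB b v p).1 = v := by
          apply pvFillB_skip
          rcases hskip with h' | h'
          · exact Or.inr (Or.inl h')
          · exact Or.inl h'
        rw [ih v t' s (by
          have hl := h
          simp only [List.length_cons, List.length_append] at hl ⊢
          omega)]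
        simp [List.foldl_cons, hfill]
      · rw [if_neg hskip]
        rw [not_or] at hskip
        obtain ⟨hnv, hinr'⟩ := hskip
        have hinr : pvInR p.1 p.2 = true := by simpa using hinr'
        by_cases hX : pvCell b p.1 p.2 = some "X"
        · rw [if_pos hX]
          have hlt : pvUnv (p :: v) < pvUnv v := pvUnv_cons_lt v p hinr hnv
          set nbrs := (pvDirs4.map (fun dd => (p.1 + dd.1, p.2 + dd.2))).filter
              (fun nn => pvInR nn.1 nn.2) with hnbrs
          have hlen : nbrs.length ≤ 4 := by
            calc nbrs.length ≤ (pvDirs4.map (fun dd => (p.1 + dd.1, p.2 + dd.2))).length :=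
                  List.length_filter_le _ _
              _ = 4 := by simp [pvDirs4]
          have step1 : pvLoopA b (p :: v) (nbrs.reverse ++ (t' ++ s))
              = pvLoopA b (nbrs.reverse.foldl (fun w q => (pvFillB b w q).1) (p :: v)) (t' ++ s) := by
            apply ih
            have hl := h
            simp only [List.length_cons, List.length_append, List.length_reverse] at hl ⊢
            omega
          have hrev : nbrs.reverse
              = (pvDirs4.reverse.map (fun dd => (p.1 + dd.1, p.2 + dd.2))).filter
                  (fun nn => pvInR nn.1 nn.2) := by
            rw [hnbrs, ← List.filter_reverse, ← List.map_reverse]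
          have hfold : nbrs.reverse.foldl (fun w q => (pvFillB b w q).1) (p :: v)
              = (pvFillB b v p).1 := by
            rw [hrev, pvFold_filter]
            rw [pvFillB_val, if_neg (by simp [hinr]), if_neg (by simp [hnv, hX])]
            simp only [pvDirs4, List.reverse_cons, List.reverse_nil, List.nil_append,
              List.cons_append, List.map_cons, List.map_nil, List.foldl_cons, List.foldl_nil]
            have e1 : (p.1 + -1, p.2 + 0) = (p.1 - 1, p.2) := Prod.ext (by omega) (by omega)
            have e2 : (p.1 + 0, p.2 + -1) = (p.1, p.2 - 1) := Prod.ext (by omega) (by omega)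
            have e3 : (p.1 + 1, p.2 + 0) = (p.1 + 1, p.2) := Prod.ext (by omega) (by omega)
            have e4 : (p.1 + 0, p.2 + 1) = (p.1, p.2 + 1) := Prod.ext (by omega) (by omega)
            rw [e1, e2, e3, e4]
          rw [step1, hfold]
          have hle : pvUnv (pvFillB b v p).1 ≤ pvUnv (p :: v) := by
            have := hfold ▸ pvFold_unv_le b nbrs.reverse (p :: v)
            exact this
          rw [ih _ t' s (by
            have hl := h
            simp only [List.length_cons, List.length_append] at hl ⊢
            omega)]
          simp [List.foldl_cons]
        · rw [if_neg hX]
          have hfill : (pvFillB b v p).1 = v := pvFillB_skip b v p (Or.inr (Or.inr hX))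
          rw [ih v t' s (by
            have hl := h
            simp only [List.length_cons, List.length_append] at hl ⊢
            omega)]
          simp [List.foldl_cons, hfill]

theorem pvVisited_eq (b : List (List String)) (x y : Int) :
    pvLoopA b [] [(x, y)] = (pvFillB b [] (x, y)).1 := by
  have h := pvLoopA_foldl b (5 * pvUnv [] + 1) [] [(x, y)] [] (by simp)
  simp only [List.append_nil, List.foldl_cons, List.foldl_nil] at h
  rw [h, pvLoopA]

-- ===== VERDICT (by name: the statement is the Claim_ definition above) =====
theorem is_ship_sunk_spec : Claim_equal_is_ship_sunk := by
  intro b x y d _ _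
  unfold Spec_is_ship_sunk is_ship_sunk is_ship_sunk_alt
  rw [pvVisited_eq]
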